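-- pv_equiv track=rewrite | github.com/tgv2002/Wikipedia-Search-Engine | search_hindi.py | get_fieldwise_split
-- ===== SOURCE A (Python) =====
-- tag_set = set("tibclr")
--
-- def get_fieldwise_split(query):
--     curr_field, curr_string, i, field_split = "d", "", 0, {}
--     while i < len(query):
--         if i < len(query) - 1 and query[i] in tag_set and query[i+1] == ':':
--             field_split[curr_field] = curr_string
--             curr_string, curr_field = "", query[i]
--             i += 1
--         else:
--             curr_string += query[i]
--         i += 1
--     if len(curr_string) > 0:
--         field_split[curr_field] = curr_string
--     return field_split
-- ===== SOURCE B (Python) =====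
-- def get_fieldwise_split(query):
--     n = len(query)
--     marks = [i for i in range(n - 1) if query[i] in "tibclr" and query[i + 1] == ':']
--     fields = 'd' + ''.join(query[i] for i in marks)
--     starts = [0] + [i + 2 for i in marks]
--     bounds = marks + [n]
--     pairs = [(f, query[a:b]) for f, a, b in zip(fields, starts, bounds)]
--     field_split = {}
--     for f, c in pairs[:-1]:
--         field_split[f] = c
--     f, c = pairs[-1]
--     if c:
--         field_split[f] = c
--     return field_split
-- ===== Notes on version B (the rewrite author's own statement) =====
-- stated objective: faster
-- what changed: B replaces A's stateful char-by-char scan (accumulating curr_string by repeated string concatenation) with a two-phase algorithm: first compute all marker positions with one comprehension, then build the (field, content) pairs by zipping marker-derived fields/starts/bounds and slicing, writing each into the dict and the last pair only if non-empty.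
import Mathlib
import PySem

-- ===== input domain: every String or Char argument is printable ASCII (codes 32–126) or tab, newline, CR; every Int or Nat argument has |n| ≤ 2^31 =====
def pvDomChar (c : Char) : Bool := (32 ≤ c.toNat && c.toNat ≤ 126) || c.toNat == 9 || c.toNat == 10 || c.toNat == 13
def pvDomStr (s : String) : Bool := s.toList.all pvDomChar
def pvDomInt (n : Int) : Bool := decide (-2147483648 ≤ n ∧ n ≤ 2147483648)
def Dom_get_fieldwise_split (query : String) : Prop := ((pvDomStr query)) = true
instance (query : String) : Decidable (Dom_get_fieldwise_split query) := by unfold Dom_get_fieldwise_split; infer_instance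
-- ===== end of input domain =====

-- B re-implements A's char-by-char scan (which grows curr_string by repeated concatenation) as:
-- find all field-marker positions first, then slice the query between them (measured faster).

-- ===== PORT A =====
-- tag_set = set("tibclr")
def pvTagSet : PySem.Set Char := PySem.Set.ofList "tibclr".toList

-- A's while loop over index i, as structural recursion on the not-yet-consumed suffix
-- query[i:] (state: curr_field, curr_string, field_split; i advances by 2 on a marker, 1 otherwise;
-- the test 'i < len(query)-1 and query[i] in tag_set and query[i+1]==":"' is exactly the
-- two-cons pattern test below).
def pvLoopA (field : String) (acc : List Char) (d : PySem.Dict String String) :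
    List Char → PySem.Dict String String
  | c1 :: c2 :: rest =>
      if pvTagSet.contains c1 && c2 == ':' then
        pvLoopA (String.ofList [c1]) [] (d.insert field (String.ofList acc)) rest
      else
        pvLoopA field (acc ++ [c1]) d (c2 :: rest)
  | [c] => pvLoopA field (acc ++ [c]) d []
  | [] => if acc.length > 0 then d.insert field (String.ofList acc) else d

def get_fieldwise_split (query : String) : List (String × String) :=
  (pvLoopA "d" [] PySem.Dict.empty query.toList).items

-- ===== PORT B =====
-- marks = [i for i in range(n-1) if query[i] in "tibclr" and query[i+1] == ':']
-- (indexing query[i], query[i+1] with 0 ≤ i < n-1 is in range, so List.getD is exact)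
def pvMarks (l : List Char) : List Nat :=
  (List.range (l.length - 1)).filter
    (fun i => pvTagSet.contains (l.getD i ' ') && l.getD (i + 1) ' ' == ':')

def get_fieldwise_split_alt (query : String) : List (String × String) :=
  let l := query.toList
  let n := l.length
  let marks := pvMarks l
  let fields := 'd' :: marks.map (fun i => l.getD i ' ')              -- 'd' + ''.join(query[i] for i in marks)
  let starts := 0 :: marks.map (· + 2)
  let bounds := marks ++ [n]
  -- query[a:b] with natural bounds is (l.drop a).take (b - a), exactly (PySem.List.slice_natCast)
  let pairs := (fields.zip (starts.zip bounds)).map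
      (fun p => (String.ofList [p.1], String.ofList ((l.drop p.2.1).take (p.2.2 - p.2.1))))
  let d := pairs.dropLast.foldl (fun d p => d.insert p.1 p.2) PySem.Dict.empty
  (match pairs.getLast? with                                          -- f, c = pairs[-1]; if c: d[f] = c
   | some fc => if fc.2 ≠ "" then d.insert fc.1 fc.2 else d
   | none => d).items

-- ===== PRECONDITION & SPEC =====
def Spec_get_fieldwise_split (query : String) (out : List (String × String)) : Prop := out = get_fieldwise_split_alt query
instance (query : String) (out : List (String × String)) : Decidable (Spec_get_fieldwise_split query out) := by unfold Spec_get_fieldwise_split; infer_instance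

-- ===== CLAIM (what is proved, stated in full; the proofs are below) =====
def Claim_equal_get_fieldwise_split : Prop := ∀ (query : String), Dom_get_fieldwise_split query → Spec_get_fieldwise_split query (get_fieldwise_split query)

-- ===== LEMMAS AND PROOFS =====

-- Canonical middle layer: the ordered list of (field, content) segments A's scan produces
-- (last segment included unconditionally here).
def pvSegs (field : String) (acc : List Char) : List Char → List (String × String)
  | c1 :: c2 :: rest =>
      if pvTagSet.contains c1 && c2 == ':' then
        (field, String.ofList acc) :: pvSegs (String.ofList [c1]) [] rest
      else
        pvSegs field (acc ++ [c1]) (c2 :: rest)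
  | [c] => pvSegs field (acc ++ [c]) []
  | [] => [(field, String.ofList acc)]

-- Writing all segments but the last into the dict, the last only if non-empty.
def pvApply (d : PySem.Dict String String) : List (String × String) → PySem.Dict String String
  | [] => d
  | [fc] => if fc.2 ≠ "" then d.insert fc.1 fc.2 else d
  | p :: q :: rest => pvApply (d.insert p.1 p.2) (q :: rest)

-- The segment list built from marker positions by slicing (tail segments).
def pvChain (l : List Char) : List Nat → List (String × String)
  | [] => []
  | i :: is =>
      (String.ofList [l.getD i ' '], String.ofList ((l.drop (i + 2)).take (is.headD l.length - (i + 2))))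
        :: pvChain l is

theorem pvSegs_ne_nil (field : String) (acc : List Char) (l : List Char) :
    pvSegs field acc l ≠ [] := by
  fun_induction pvSegs field acc l <;> simp_all [pvSegs]

theorem pvApply_cons (d : PySem.Dict String String) (p : String × String)
    (ps : List (String × String)) (h : ps ≠ []) :
    pvApply d (p :: ps) = pvApply (d.insert p.1 p.2) ps := by
  cases ps with
  | nil => exact absurd rfl h
  | cons q rest => rfl

-- A's loop = write the segment list into the dict.
theorem pvLoopA_eq (field : String) (acc : List Char) (d : PySem.Dict String String)
    (l : List Char) : pvLoopA field acc d l = pvApply d (pvSegs field acc l) := by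
  have hiff : ∀ acc : List Char, String.ofList acc ≠ "" ↔ acc.length > 0 := by
    intro acc; simp [← String.toList_inj, List.length_pos_iff]
  fun_induction pvLoopA field acc d l with
  | case1 field acc d c1 c2 rest h ih =>
      rw [pvSegs, if_pos h, pvApply_cons _ _ _ (pvSegs_ne_nil _ _ _), ih]
  | case2 field acc d c1 c2 rest h ih => rw [pvSegs, if_neg h, ih]
  | case3 field acc d c ih => rw [pvSegs, ih]
  | case4 field acc d h =>
      simp only [pvSegs, pvApply]
      rw [if_pos ((hiff acc).mpr h)]
  | case5 field acc d h =>
      simp only [pvSegs, pvApply]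
      rw [if_neg (fun hx => h ((hiff acc).mp hx))]

-- B's final dict-building = pvApply, for a non-empty pair list.
theorem pvBForm_eq (ps : List (String × String)) (d : PySem.Dict String String) (h : ps ≠ []) :
    (match ps.getLast? with
     | some fc => if fc.2 ≠ "" then (ps.dropLast.foldl (fun d p => d.insert p.1 p.2) d).insert fc.1 fc.2
                  else ps.dropLast.foldl (fun d p => d.insert p.1 p.2) d
     | none => ps.dropLast.foldl (fun d p => d.insert p.1 p.2) d)
      = pvApply d ps := by
  induction ps generalizing d with
  | nil => exact absurd rfl h
  | cons p ps ih =>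
      cases ps with
      | nil => simp [pvApply]
      | cons q rest =>
          rw [pvApply_cons _ _ _ (by simp),
            show (p :: q :: rest).dropLast = p :: (q :: rest).dropLast from rfl,
            List.getLast?_cons_cons, List.foldl_cons]
          exact ih (d := d.insert p.1 p.2) (by simp)

-- ----- marker-position lemmas -----

theorem pvMarks_step (c : Char) (cs : List Char) :
    pvMarks (c :: cs) =
      (if pvTagSet.contains c && cs.getD 0 ' ' == ':' then [0] else [])
        ++ (pvMarks cs).map (· + 1) := by
  cases cs with
  | nil => simp [pvMarks]
  | cons c2 cs2 =>
      show (List.range (cs2.length + 1)).filter _ = _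
      rw [List.range_succ_eq_map, List.filter_cons]
      have hmap : ∀ (p : Nat → Bool) (xs : List Nat),
          (xs.map (· + 1)).filter p = (xs.filter (fun i => p (i + 1))).map (· + 1) := by
        intro p xs; induction xs with
        | nil => rfl
        | cons x xs ih => simp [List.filter_cons]; split_ifs <;> simp_all
      rw [hmap]
      have : ∀ i : Nat,
          (pvTagSet.contains ((c :: c2 :: cs2).getD (i + 1) ' ')
            && (c :: c2 :: cs2).getD (i + 1 + 1) ' ' == ':')
          = (pvTagSet.contains ((c2 :: cs2).getD i ' ') && (c2 :: cs2).getD (i + 1) ' ' == ':') := by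
        intro i; rfl
      simp only [List.getD_cons_succ, List.getD_cons_zero, pvMarks]
      split_ifs <;> simp_all

theorem pvMarks_marker (c1 c2 : Char) (rest : List Char)
    (h : (pvTagSet.contains c1 && c2 == ':') = true) :
    pvMarks (c1 :: c2 :: rest) = 0 :: (pvMarks rest).map (· + 2) := by
  have hc2 : c2 = ':' := by
    have := (Bool.and_eq_true _ _).mp h
    simpa using this.2
  subst hc2
  rw [pvMarks_step]
  simp only [List.getD_cons_zero, h, if_pos]
  rw [pvMarks_step, if_neg (by intro hx; simp at hx; exact absurd hx.1 (by decide))]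
  simp [List.map_map, Function.comp_def, Nat.add_assoc]

theorem pvMarks_nonmarker (c1 c2 : Char) (rest : List Char)
    (h : (pvTagSet.contains c1 && c2 == ':') = false) :
    pvMarks (c1 :: c2 :: rest) = (pvMarks (c2 :: rest)).map (· + 1) := by
  rw [pvMarks_step]
  simp only [List.getD_cons_zero, h]
  simp

-- ----- shift lemmas for pvChain -----

theorem pvChain_shift1 (c : Char) (cs : List Char) (is : List Nat) :
    pvChain (c :: cs) (is.map (· + 1)) = pvChain cs is := by
  induction is with
  | nil => rfl
  | cons i is ih =>
      simp only [List.map_cons, pvChain, ih]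
      congr 2
      · cases is <;> simp

theorem pvChain_shift2 (c1 c2 : Char) (cs : List Char) (is : List Nat) :
    pvChain (c1 :: c2 :: cs) (is.map (· + 2)) = pvChain cs is := by
  induction is with
  | nil => rfl
  | cons i is ih =>
      simp only [List.map_cons, pvChain, ih]
      congr 2
      · cases is <;> simp

theorem pvSegs_eq_chain (l : List Char) (field : String) (acc : List Char) :
    pvSegs field acc l =
      (field, String.ofList (acc ++ l.take ((pvMarks l).headD l.length)))
        :: pvChain l (pvMarks l) := by
  fun_induction pvSegs field acc l with
  | case1 field acc c1 c2 rest h ih =>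
      rw [ih, pvMarks_marker c1 c2 rest h, pvChain]
      have hb : ((pvMarks rest).map (· + 2)).headD (c1 :: c2 :: rest).length - (0 + 2)
          = (pvMarks rest).headD rest.length := by
        cases pvMarks rest <;> simp
      rw [pvChain_shift2, hb]
      simp
  | case2 field acc c1 c2 rest h ih =>
      rw [ih, pvMarks_nonmarker c1 c2 rest (by simpa using h), pvChain_shift1]
      have hb : ((pvMarks (c2 :: rest)).map (· + 1)).headD (c1 :: c2 :: rest).length
          = (pvMarks (c2 :: rest)).headD (c2 :: rest).length + 1 := by
        cases pvMarks (c2 :: rest) <;> simp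
      rw [hb]
      simp [List.take_succ_cons]
  | case3 field acc c ih =>
      rw [ih]
      simp [pvMarks, pvChain]
  | case4 field acc =>
      simp [pvMarks, pvChain]
theorem pvZip_eq_chain (l : List Char) (ms : List Nat) :
    ((ms.map (fun i => l.getD i ' ')).zip ((ms.map (· + 2)).zip (ms.tail ++ [l.length]))).map
        (fun p => (String.ofList [p.1], String.ofList ((l.drop p.2.1).take (p.2.2 - p.2.1))))
      = pvChain l ms := by
  induction ms with
  | nil => rfl
  | cons i is ih =>
      cases is with
      | nil => simp [pvChain, List.headD]
      | cons j is' =>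
          simp only [List.map_cons, List.tail_cons, List.cons_append, List.zip_cons_cons,
            pvChain, List.headD]
          exact congrArg _ (by simpa using ih)

theorem pvPairs_eq_segs (l : List Char) :
    ((('d' :: (pvMarks l).map (fun i => l.getD i ' ')).zip
        ((0 :: (pvMarks l).map (· + 2)).zip (pvMarks l ++ [l.length]))).map
        (fun p => (String.ofList [p.1], String.ofList ((l.drop p.2.1).take (p.2.2 - p.2.1)))))
      = pvSegs "d" [] l := by
  rw [pvSegs_eq_chain]
  cases hms : pvMarks l with
  | nil => simp [pvChain]
  | cons m ms =>
      simp only [List.cons_append, List.zip_cons_cons, List.map_cons]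
      rw [List.cons_eq_cons]
      refine ⟨by simp, ?_⟩
      rw [← pvZip_eq_chain l (m :: ms)]
      simp

-- ===== VERDICT (by name: the statement is the Claim_ definition above) =====
theorem get_fieldwise_split_spec : Claim_equal_get_fieldwise_split := by
  intro query _
  show get_fieldwise_split query = get_fieldwise_split_alt query
  simp only [get_fieldwise_split, get_fieldwise_split_alt]
  rw [pvLoopA_eq]
  congr 1
  rw [pvPairs_eq_segs query.toList]
  exact (pvBForm_eq _ _ (pvSegs_ne_nil _ _ _)).symm
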